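-- pv_equiv track=rewrite | github.com/flaugusto/mc102 | 20/lab20.py | getRegionIndex
-- ===== SOURCE A (Python) =====
-- def getRegionIndex(index):
--     # Cria uma matriz que servirá de guia para localização da região a ser procurada
--     indexes = [
--         [0,1,2],
--         [3,4,5],
--         [6,7,8]
--     ]
--     # Baseado no indice da posicao recebido, retorna qual o indice da região correspondente
--     for i in range(3):
--         for j in range(3):
--             if indexes[i][j] == index:
--                 # indice da região
--                 return i
-- ===== SOURCE B (Python) =====
-- def getRegionIndex(index):
--     # Closed form: the region row is the integer quotient by 3, defined only for 0..8.
--     if 0 <= index < 9: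
--         return index // 3
--     return None
-- ===== Notes on version B (the rewrite author's own statement) =====
-- stated objective: simpler
-- what changed: Replaced the 3x3 matrix double-loop scan with the closed form index // 3 guarded by a 0 <= index < 9 range check (None otherwise, as A falls off the loop).
import Mathlib
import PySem

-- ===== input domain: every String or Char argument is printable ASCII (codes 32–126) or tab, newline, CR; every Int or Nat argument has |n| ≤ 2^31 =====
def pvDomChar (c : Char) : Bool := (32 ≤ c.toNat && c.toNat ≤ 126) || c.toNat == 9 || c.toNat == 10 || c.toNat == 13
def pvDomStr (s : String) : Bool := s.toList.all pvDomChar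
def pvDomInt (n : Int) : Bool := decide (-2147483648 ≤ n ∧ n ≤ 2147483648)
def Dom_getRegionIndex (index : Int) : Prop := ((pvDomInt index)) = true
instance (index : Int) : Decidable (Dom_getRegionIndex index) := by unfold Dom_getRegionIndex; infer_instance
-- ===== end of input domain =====

-- B replaces A's 3x3 matrix double-loop scan with the closed form index // 3 guarded by a range check (simpler).


-- ===== PORT A =====
-- inner 'for j in range(3)': scan one row, return i on a match
def griInner (index : Int) (i : Nat) (row : List Int) : List Nat → Option Int
  | [] => none
  | j :: js => if row.getD j 0 == index then some (i : Int) else griInner index i row js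

-- outer 'for i in range(3)': scan the rows; falling off both loops yields none
def griOuter (index : Int) (indexes : List (List Int)) : List Nat → Option Int
  | [] => none
  | i :: is =>
      match griInner index i (indexes.getD i []) [0, 1, 2] with
      | some r => some r
      | none => griOuter index indexes is

def getRegionIndex (index : Int) : Option Int :=
  griOuter index [[0, 1, 2], [3, 4, 5], [6, 7, 8]] [0, 1, 2]

-- ===== PORT B =====
def getRegionIndex_alt (index : Int) : Option Int :=
  if 0 ≤ index ∧ index < 9 then some (PySem.Int.floordiv index 3) else none

-- ===== PRECONDITION & SPEC =====
def Spec_getRegionIndex (index : Int) (out : Option Int) : Prop := out = getRegionIndex_alt index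
instance (index : Int) (out : Option Int) : Decidable (Spec_getRegionIndex index out) := by unfold Spec_getRegionIndex; infer_instance

-- ===== CLAIM (what is proved, stated in full; the proofs are below) =====
def Claim_equal_getRegionIndex : Prop := ∀ (index : Int), Dom_getRegionIndex index → Spec_getRegionIndex index (getRegionIndex index)

-- ===== LEMMAS AND PROOFS =====

-- ===== VERDICT (by name: the statement is the Claim_ definition above) =====
theorem getRegionIndex_spec : Claim_equal_getRegionIndex := by
  intro index _
  unfold Spec_getRegionIndex getRegionIndex getRegionIndex_alt
  by_cases h : 0 ≤ index ∧ index < 9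
  · -- index ∈ {0,…,8}: evaluate both sides case by case
    obtain ⟨h0, h9⟩ := h
    interval_cases index <;> decide
  · -- out of range: every comparison in the scan fails and B's guard is false
    rw [if_neg h]
    simp [griOuter, griInner]
    split_ifs <;> first | rfl | (exfalso; omega)
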